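-- pv_equiv track=rewrite | github.com/jgaye/LeetCodeSnippets | 1493/src.py | extract_arrays_ones
-- ===== SOURCE A (Python) =====
-- from typing import List
--
-- def extract_arrays_ones(offset: int, nums: List[int], acc: List[tuple]):
--     try:
--         l = nums.index(1)
--     except ValueError:
--         return acc
--
--     try:
--         r = l + nums[l:].index(0) - 1
--     except ValueError:
--         acc.append((offset + l, offset + len(nums) - 1))
--         return acc
--
--     acc.append((offset + l, offset + r))
--     acc = extract_arrays_ones(offset + 1 + r, nums[r + 1 :], acc)
--     return acc
-- ===== SOURCE B (Python) =====
-- def extract_arrays_ones(offset, nums, acc):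
--     start = None   # absolute index of the current run's first 1, or None
--     pos = offset
--     for v in nums:
--         if start is None:
--             if v == 1:
--                 start = pos
--         elif v == 0:
--             acc.append((start, pos - 1))
--             start = None
--         pos += 1
--     if start is not None:
--         acc.append((start, pos - 1))
--     return acc
-- ===== Notes on version B (the rewrite author's own statement) =====
-- stated objective: alternative
-- what changed: Replaced the recursive list.index/slice search that copies tail slices by a single iterative linear scan over nums tracking the current run start (no slicing, no recursion).
import Mathlib
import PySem

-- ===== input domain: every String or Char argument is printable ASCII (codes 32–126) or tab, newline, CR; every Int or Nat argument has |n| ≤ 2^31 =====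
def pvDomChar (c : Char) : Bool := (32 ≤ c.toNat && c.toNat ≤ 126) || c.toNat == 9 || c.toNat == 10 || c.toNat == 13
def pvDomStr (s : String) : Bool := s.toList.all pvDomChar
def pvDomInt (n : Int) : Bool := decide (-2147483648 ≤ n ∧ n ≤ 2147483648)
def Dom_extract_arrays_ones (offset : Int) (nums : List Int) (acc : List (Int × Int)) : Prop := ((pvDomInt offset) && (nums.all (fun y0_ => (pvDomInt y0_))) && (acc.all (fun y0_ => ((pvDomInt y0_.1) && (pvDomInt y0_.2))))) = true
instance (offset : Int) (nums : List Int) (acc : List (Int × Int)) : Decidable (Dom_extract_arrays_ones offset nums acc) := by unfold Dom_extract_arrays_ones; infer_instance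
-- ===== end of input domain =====

-- B replaces A's recursive index()/slice search by one iterative linear scan tracking the current
-- run's start (no slicing, no recursion); equivalence is about the RETURN value (both append to acc in place).

-- ===== PORT A =====
-- literal port of A: index(1); index(0) in nums[l:]; append; recurse on nums[r+1:]
def extract_arrays_ones (offset : Int) (nums : List Int) (acc : List (Int × Int)) : List (Int × Int) :=
  match h1 : PySem.List.index? nums 1 with
  | none => acc
  | some l =>
    match h2 : PySem.List.index? (PySem.List.slice nums (some (l : Int)) none) 0 with
    | none => acc ++ [(offset + l, offset + nums.length - 1)]
    | some i =>
      let r : Int := (l : Int) + (i : Int) - 1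
      extract_arrays_ones (offset + 1 + r) (PySem.List.slice nums (some (r + 1)) none)
        (acc ++ [(offset + l, offset + r)])
termination_by nums.length
decreasing_by
  -- the slice start r+1 = l+i with i ≥ 1, so the slice is strictly shorter
  obtain ⟨hl, hget, -⟩ := PySem.List.getElem_of_index?_eq_some h1
  have hdrop : PySem.List.slice nums (some (l : Int)) none = nums.drop l :=
    PySem.List.slice_from_natCast nums l
  have hipos : 1 ≤ i := by
    rcases Nat.eq_zero_or_pos i with hi0 | hi
    · exfalso
      have hcons : nums.drop l = nums[l] :: nums.drop (l + 1) := List.drop_eq_getElem_cons hl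
      rw [hdrop, hcons, hget] at h2
      subst hi0
      rw [PySem.List.index?_cons_of_ne _ (show (1 : Int) ≠ 0 by norm_num)] at h2
      rcases Option.map_eq_some_iff.mp h2 with ⟨k, -, hk⟩
      omega
    · omega
  have hr : (((l : Int) + (i : Int) - 1) + 1) = ((l + i : Nat) : Int) := by push_cast; ring
  have hslice : PySem.List.slice nums (some (((l : Int) + (i : Int) - 1) + 1)) none
      = nums.drop (l + i) := by rw [hr]; exact PySem.List.slice_from_natCast nums (l + i)
  simp only [hslice, List.length_drop]
  omega

-- ===== PORT B =====
-- literal port of Source B: fold over nums with state (start?, pos, acc), then flush the open run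
def extract_arrays_ones_alt (offset : Int) (nums : List Int) (acc : List (Int × Int)) : List (Int × Int) :=
  let st : Option Int × Int × List (Int × Int) :=
    nums.foldl
      (fun (st : Option Int × Int × List (Int × Int)) (v : Int) =>
        let st' : Option Int × Int × List (Int × Int) :=
          match st.1 with
          | none => if v = 1 then (some st.2.1, st.2.1, st.2.2) else st
          | some s => if v = 0 then (none, st.2.1, st.2.2 ++ [(s, st.2.1 - 1)]) else st
        (st'.1, st'.2.1 + 1, st'.2.2))
      (none, offset, acc)
  match st.1 with
  | none => st.2.2
  | some s => st.2.2 ++ [(s, st.2.1 - 1)]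

-- ===== PRECONDITION & SPEC =====
def Spec_extract_arrays_ones (offset : Int) (nums : List Int) (acc : List (Int × Int)) (out : List (Int × Int)) : Prop := out = extract_arrays_ones_alt offset nums acc
instance (offset : Int) (nums : List Int) (acc : List (Int × Int)) (out : List (Int × Int)) : Decidable (Spec_extract_arrays_ones offset nums acc out) := by unfold Spec_extract_arrays_ones; infer_instance

-- ===== CLAIM (what is proved, stated in full; the proofs are below) =====
def Claim_equal_extract_arrays_ones : Prop := ∀ (offset : Int) (nums : List Int) (acc : List (Int × Int)), Dom_extract_arrays_ones offset nums acc → Spec_extract_arrays_ones offset nums acc (extract_arrays_ones offset nums acc)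

-- ===== LEMMAS AND PROOFS =====

-- structural form of B's loop, used only in the proofs
def loopB (start? : Option Int) (pos : Int) (nums : List Int) (acc : List (Int × Int)) : List (Int × Int) :=
  match nums with
  | [] =>
    match start? with
    | none => acc
    | some s => acc ++ [(s, pos - 1)]
  | v :: t =>
    match start? with
    | none => if v = 1 then loopB (some pos) (pos + 1) t acc else loopB none (pos + 1) t acc
    | some s => if v = 0 then loopB none (pos + 1) t (acc ++ [(s, pos - 1)]) else loopB (some s) (pos + 1) t acc

-- the fold in the port of B, as a named function, so the bridging lemma can recurse on nums
theorem alt_fold_eq_loopB (nums : List Int) (start? : Option Int) (pos : Int) (acc : List (Int × Int)) :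
    (let st := nums.foldl
        (fun (st : Option Int × Int × List (Int × Int)) (v : Int) =>
          let st' : Option Int × Int × List (Int × Int) :=
            match st.1 with
            | none => if v = 1 then (some st.2.1, st.2.1, st.2.2) else st
            | some s => if v = 0 then (none, st.2.1, st.2.2 ++ [(s, st.2.1 - 1)]) else st
          (st'.1, st'.2.1 + 1, st'.2.2)) (start?, pos, acc)
     match st.1 with
     | none => st.2.2
     | some s => st.2.2 ++ [(s, st.2.1 - 1)]) = loopB start? pos nums acc := by
  induction nums generalizing start? pos acc with
  | nil => cases start? <;> simp [loopB]
  | cons v t ih =>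
    cases start? with
    | none =>
      by_cases hv : v = (1 : Int) <;>
        simp only [List.foldl_cons, loopB, hv, if_pos, if_neg, not_false_iff] <;>
        first
          | exact ih (some pos) (pos + 1) acc
          | exact ih none (pos + 1) acc
    | some s =>
      by_cases hv : v = (0 : Int) <;>
        simp only [List.foldl_cons, loopB, hv, if_pos, if_neg, not_false_iff] <;>
        first
          | exact ih none (pos + 1) (acc ++ [(s, pos - 1)])
          | exact ih (some s) (pos + 1) acc

theorem alt_eq_loopB (offset : Int) (nums : List Int) (acc : List (Int × Int)) :
    extract_arrays_ones_alt offset nums acc = loopB none offset nums acc := by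
  unfold extract_arrays_ones_alt
  exact alt_fold_eq_loopB nums none offset acc

theorem loopB_skip_no_one (pre : List Int) (h : (1 : Int) ∉ pre) (pos : Int) (rest : List Int)
    (acc : List (Int × Int)) : loopB none pos (pre ++ rest) acc = loopB none (pos + pre.length) rest acc := by
  induction pre generalizing pos with
  | nil => simp
  | cons a t ih =>
    have ha : a ≠ (1 : Int) := fun hh => h (by simp [hh])
    have ht : (1 : Int) ∉ t := fun hh => h (by simp [hh])
    show loopB none pos ((a :: t) ++ rest) acc = _
    rw [List.cons_append]
    show (if a = 1 then loopB (some pos) (pos + 1) (t ++ rest) acc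
          else loopB none (pos + 1) (t ++ rest) acc) = _
    rw [if_neg ha, ih ht (pos + 1)]
    congr 1
    push_cast [List.length_cons]
    ring

theorem loopB_no_zero (suf : List Int) (h : (0 : Int) ∉ suf) (s pos : Int) (acc : List (Int × Int)) :
    loopB (some s) pos suf acc = acc ++ [(s, pos + suf.length - 1)] := by
  induction suf generalizing pos with
  | nil => simp [loopB]
  | cons a t ih =>
    have ha : a ≠ (0 : Int) := fun hh => h (by simp [hh])
    have ht : (0 : Int) ∉ t := fun hh => h (by simp [hh])
    show (if a = 0 then loopB none (pos + 1) t (acc ++ [(s, pos - 1)])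
          else loopB (some s) (pos + 1) t acc) = _
    rw [if_neg ha, ih ht (pos + 1)]
    congr 3
    push_cast [List.length_cons]
    ring

theorem loopB_run (mid : List Int) (h : (0 : Int) ∉ mid) (s pos : Int) (rest : List Int)
    (acc : List (Int × Int)) :
    loopB (some s) pos (mid ++ 0 :: rest) acc
      = loopB none (pos + mid.length + 1) rest (acc ++ [(s, pos + mid.length - 1)]) := by
  induction mid generalizing pos with
  | nil =>
    show (if (0 : Int) = 0 then loopB none (pos + 1) rest (acc ++ [(s, pos - 1)])
          else loopB (some s) (pos + 1) rest acc) = _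
    rw [if_pos rfl]
    simp
  | cons a t ih =>
    have ha : a ≠ (0 : Int) := fun hh => h (by simp [hh])
    have ht : (0 : Int) ∉ t := fun hh => h (by simp [hh])
    show (if a = 0 then loopB none (pos + 1) (t ++ 0 :: rest) (acc ++ [(s, pos - 1)])
          else loopB (some s) (pos + 1) (t ++ 0 :: rest) acc) = _
    rw [if_neg ha, ih ht (pos + 1)]
    have h1 : pos + 1 + (t.length : Int) + 1 = pos + ((a :: t).length : Int) + 1 := by
      push_cast [List.length_cons]; ring
    have h2 : pos + 1 + (t.length : Int) - 1 = pos + ((a :: t).length : Int) - 1 := by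
      push_cast [List.length_cons]; ring
    rw [h1, h2]

theorem loopB_start_one (pos : Int) (suf : List Int) (acc : List (Int × Int)) :
    loopB none pos (1 :: suf) acc = loopB (some pos) (pos + 1) suf acc := by
  simp [loopB]

theorem A_eq_loopB (offset : Int) (nums : List Int) (acc : List (Int × Int)) :
    extract_arrays_ones offset nums acc = loopB none offset nums acc := by
  fun_induction extract_arrays_ones offset nums acc with
  | case1 offset nums acc h1 =>
    have hn : (1 : Int) ∉ nums := (PySem.List.index?_eq_none_iff nums 1).mp h1
    have := loopB_skip_no_one nums hn offset [] acc
    simpa using this.symm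
  | case2 offset nums acc l h1 h2 =>
    obtain ⟨pre, suf, hsplit, hlen, hpre⟩ := (PySem.List.index?_eq_some_iff nums 1 l).mp h1
    have hdrop : PySem.List.slice nums (some (l : Int)) none = 1 :: suf := by
      rw [PySem.List.slice_from_natCast, hsplit, ← hlen, List.drop_left]
    rw [hdrop, PySem.List.index?_cons_of_ne _ (show (1 : Int) ≠ 0 by norm_num),
        Option.map_eq_none_iff] at h2
    have hsuf : (0 : Int) ∉ suf := (PySem.List.index?_eq_none_iff suf 0).mp h2
    rw [hsplit, loopB_skip_no_one pre hpre offset (1 :: suf) acc, hlen,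
        loopB_start_one, loopB_no_zero suf hsuf]
    have hL : (((pre ++ 1 :: suf).length : Nat) : Int) = (l : Int) + 1 + (suf.length : Int) := by
      simp [← hlen]; omega
    rw [hL]
    have hE : offset + ((l : Int) + 1 + (suf.length : Int)) - 1
        = offset + (l : Int) + 1 + (suf.length : Int) - 1 := by ring
    rw [hE]
  | case3 offset nums acc l h1 i h2 r ih =>
    obtain ⟨pre, suf, hsplit, hlen, hpre⟩ := (PySem.List.index?_eq_some_iff nums 1 l).mp h1
    have hdrop : PySem.List.slice nums (some (l : Int)) none = 1 :: suf := by
      rw [PySem.List.slice_from_natCast, hsplit, ← hlen, List.drop_left]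
    rw [hdrop, PySem.List.index?_cons_of_ne _ (show (1 : Int) ≠ 0 by norm_num),
        Option.map_eq_some_iff] at h2
    obtain ⟨j, hj, hij⟩ := h2
    obtain ⟨mid, rest, hsuf, hmid, hmid0⟩ := (PySem.List.index?_eq_some_iff suf 0 j).mp hj
    have hri : r = (l : Int) + (j : Int) := by simp only [r]; omega
    have hslice : PySem.List.slice nums (some (r + 1)) none = 0 :: rest := by
      have h1n : r + 1 = ((l + 1 + j : Nat) : Int) := by simp only [r]; push_cast; omega
      rw [h1n, PySem.List.slice_from_natCast, hsplit, hsuf]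
      have : pre ++ 1 :: (mid ++ 0 :: rest) = (pre ++ 1 :: mid) ++ 0 :: rest := by simp
      rw [this]
      have hlen2 : (pre ++ 1 :: mid).length = l + 1 + j := by simp only [List.length_append, List.length_cons]; omega
      rw [← hlen2, List.drop_left]
    rw [ih, hslice]
    -- reduce both sides to loopB on rest
    have hstep : loopB none (offset + 1 + r) (0 :: rest) (acc ++ [(offset + l, offset + r)])
        = loopB none (offset + 1 + r + 1) rest (acc ++ [(offset + l, offset + r)]) := by
      simp [loopB]
    rw [hstep, hsplit, loopB_skip_no_one pre hpre offset (1 :: suf) acc, hlen, loopB_start_one,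
        hsuf, loopB_run mid hmid0]
    have e1 : offset + 1 + r + 1 = offset + (l : Int) + 1 + (mid.length : Int) + 1 := by
      rw [hri, hmid]; ring
    have e2 : offset + r = offset + (l : Int) + 1 + (mid.length : Int) - 1 := by
      rw [hri, hmid]; ring
    rw [e1, e2]

-- ===== VERDICT (by name: the statement is the Claim_ definition above) =====
theorem extract_arrays_ones_spec : Claim_equal_extract_arrays_ones := by
  intro offset nums acc _
  unfold Spec_extract_arrays_ones
  rw [A_eq_loopB, alt_eq_loopB]
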